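-- pv_equiv track=rewrite | github.com/cvr-bhupalreddy/dsa-python-2025 | DSA/DP/1D_DP/2.FrogJump.py | frogJumpK_td
-- ===== SOURCE A (Python) =====
-- def frogJumpK_td(heights, k):
--     n = len(heights)
--     dp = [-1] * n
--
--     def solve(i):
--         if i == 0:
--             return 0
--         if dp[i] != -1:
--             return dp[i]
--
--         min_energy = float('inf')
--         for j in range(1, k + 1):
--             if i - j >= 0:
--                 energy = solve(i - j) + abs(heights[i] - heights[i - j])
--                 min_energy = min(min_energy, energy)
--
--         dp[i] = min_energy
--         return dp[i]
--
--     return solve(n - 1)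
-- ===== SOURCE B (Python) =====
-- def frogJumpK_td(heights, k):
--     n = len(heights)
--     dp = [0] * n
--     for i in range(1, n):
--         dp[i] = min((dp[i - j] + abs(heights[i] - heights[i - j])
--                      for j in range(1, min(k, i) + 1)), default=float('inf'))
--     return dp[n - 1]
-- ===== Notes on version B (the rewrite author's own statement) =====
-- stated objective: simpler
-- what changed: Replaces the top-down memoized recursion (inner closure over a -1-sentinel memo list) with a plain bottom-up tabulation loop that fills dp[1..n-1] left to right.
-- outside the precondition, e.g. on frogJumpK_td([3, 1, 4], 0): A returns inf, B returns inf
import Mathlib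
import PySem

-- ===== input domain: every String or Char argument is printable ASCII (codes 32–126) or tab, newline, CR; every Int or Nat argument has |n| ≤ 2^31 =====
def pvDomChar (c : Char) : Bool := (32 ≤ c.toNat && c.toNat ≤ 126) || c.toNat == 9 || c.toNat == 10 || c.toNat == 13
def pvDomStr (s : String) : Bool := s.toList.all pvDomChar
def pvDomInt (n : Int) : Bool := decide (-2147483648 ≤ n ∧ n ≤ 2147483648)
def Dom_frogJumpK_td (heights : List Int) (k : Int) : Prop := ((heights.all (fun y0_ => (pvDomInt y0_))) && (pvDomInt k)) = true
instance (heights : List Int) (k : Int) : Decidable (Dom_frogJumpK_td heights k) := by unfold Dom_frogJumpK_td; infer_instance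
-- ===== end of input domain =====

-- B replaces A's top-down memoized recursion by a plain bottom-up tabulation loop (same asymptotics, no recursion overhead).


-- ===== PORT A =====
-- min(float('inf'), e): none plays float('inf'); min_energy in A's loop is an Option Int.
def pvMinOpt (a : Option Int) (e : Int) : Option Int :=
  some (match a with | none => e | some v => min v e)

-- `solve` (the memoized inner closure) with the memo list `dp` threaded through, and
-- its `for j in range(1, k+1)` loop as the mutually recursive pvLoopA.
mutual
def pvSolveA (hs : List Int) (k : Int) : Nat → List Int → Int × List Int
  | 0, dp => (0, dp)
  | Nat.succ i, dp =>
    let cur := dp.getD (i+1) (-1)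
    if cur ≠ -1 then (cur, dp)
    else
      let r := pvLoopA hs k (i+1) (PySem.List.pyRange 1 (k+1) 1) none dp
      -- Python stores float('inf') when no j was valid; that happens only outside Pre_ (k < 1),
      -- where .getD 0 stands in for the float value.
      let v := r.1.getD 0
      (v, r.2.set (i+1) v)
  termination_by i dp => (i, (PySem.List.pyRange 1 (k+1) 1).length + 1)
  decreasing_by
    exact Prod.Lex.right _ (Nat.lt_succ_self _)
def pvLoopA (hs : List Int) (k : Int) (i : Nat) : List Int → Option Int → List Int → Option Int × List Int
  | [], acc, dp => (acc, dp)
  | j :: js, acc, dp =>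
    if (i : Int) - j ≥ 0 then
      -- totality guard: every j drawn from range(1, k+1) has j ≥ 1, so i - j < i always holds here
      if hlt : ((i : Int) - j).toNat < i then
        let p := pvSolveA hs k ((i : Int) - j).toNat dp
        let e := p.1 + |hs.getD i 0 - hs.getD ((i : Int) - j).toNat 0|
        pvLoopA hs k i js (pvMinOpt acc e) p.2
      else
        pvLoopA hs k i js acc dp
    else
      pvLoopA hs k i js acc dp
  termination_by js acc dp => (i, js.length)
  decreasing_by
    · exact Prod.Lex.left _ _ hlt
    · exact Prod.Lex.right _ (Nat.lt_succ_self _)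
    · exact Prod.Lex.right _ (Nat.lt_succ_self _)
    · exact Prod.Lex.right _ (Nat.lt_succ_self _)
end

def frogJumpK_td (heights : List Int) (k : Int) : Int :=
  match heights.length with
  | 0 => 0   -- Python: solve(-1) hits dp[-1] on the empty memo → IndexError; excluded by Pre_
  | Nat.succ m => (pvSolveA heights k m (List.replicate (m+1) (-1))).1

-- ===== PORT B =====
-- the body of B's `for i in range(1, n)` loop: dp[i] = min(dp[i-j] + |h[i]-h[i-j]| for j in range(1, min(k,i)+1))
def pvStepB (heights : List Int) (k : Int) (dp : List Int) (i : Int) : List Int :=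
  let cands := (PySem.List.pyRange 1 (min k i + 1) 1).map (fun j =>
      dp.getD (i - j).toNat 0 + |heights.getD i.toNat 0 - heights.getD (i - j).toNat 0|)
  let best := match cands with
    | [] => 0        -- Python: min(..., default=float('inf')) yields inf here — a non-int value, outside Pre_
    | c :: cs => cs.foldl min c
  dp.set i.toNat best

def frogJumpK_td_alt (heights : List Int) (k : Int) : Int :=
  let n := heights.length
  let dp := (PySem.List.pyRange 1 (n : Int) 1).foldl (pvStepB heights k) (List.replicate n 0)
  dp.getD (n - 1) 0

-- ===== PRECONDITION & SPEC =====
-- Pre_ excludes (a) the empty list, on which A raises IndexError, and (b) k < 1 with ≥ 2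
-- heights, on which A (and B) return float('inf') — not an int value.
def Pre_frogJumpK_td (heights : List Int) (k : Int) : Prop :=
  heights ≠ [] ∧ (1 ≤ k ∨ heights.length = 1)
instance (heights : List Int) (k : Int) : Decidable (Pre_frogJumpK_td heights k) := by
  unfold Pre_frogJumpK_td; infer_instance

def pvWitness_frogJumpK_td : List Int × Int := ([10, 30, 40, 20], 2)

def Spec_frogJumpK_td (heights : List Int) (k : Int) (out : Int) : Prop := out = frogJumpK_td_alt heights k
instance (heights : List Int) (k : Int) (out : Int) : Decidable (Spec_frogJumpK_td heights k out) := by unfold Spec_frogJumpK_td; infer_instance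

-- ===== CLAIM (what is proved, stated in full; the proofs are below) =====
def Claim_equal_frogJumpK_td : Prop := ∀ (heights : List Int) (k : Int), Dom_frogJumpK_td heights k → Pre_frogJumpK_td heights k → Spec_frogJumpK_td heights k (frogJumpK_td heights k)

-- ===== LEMMAS AND PROOFS =====

-- the exact minimal-energy value, defined by plain well-founded recursion on the index
def pvE (hs : List Int) (k : Int) : Nat → Int
  | 0 => 0
  | (i+1) =>
    match (List.range' 1 (min k.toNat (i+1))).attach.map
        (fun x => pvE hs k (i+1-x.1) + |hs.getD (i+1) 0 - hs.getD (i+1-x.1) 0|) with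
    | [] => 0
    | c :: cs => cs.foldl min c
  termination_by i => i
  decreasing_by
    have := List.mem_range'_1.mp x.2
    omega

def pvCands (hs : List Int) (k : Int) (i : Nat) : List Int :=
  (List.range' 1 (min k.toNat i)).map (fun j => pvE hs k (i-j) + |hs.getD i 0 - hs.getD (i-j) 0|)

lemma pvE_succ (hs : List Int) (k : Int) (i : Nat) :
    pvE hs k (i+1) = match pvCands hs k (i+1) with
      | [] => 0
      | c :: cs => cs.foldl min c := by
  rw [pvE, pvCands]
  rw [List.attach_map_val (l := List.range' 1 (min k.toNat (i+1)))
      (f := fun j => pvE hs k (i+1-j) + |hs.getD (i+1) 0 - hs.getD (i+1-j) 0|)]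

def pvGood (hs : List Int) (k : Int) (dp : List Int) : Prop :=
  dp.length = hs.length ∧
  ∀ m, m < hs.length → dp.getD m (-1) = -1 ∨ dp.getD m (-1) = pvE hs k m

-- the pure value computed by one iteration of A's j-loop
def pvStepF (hs : List Int) (k : Int) (i : Nat) (a : Option Int) (j : Int) : Option Int :=
  if (i : Int) - j ≥ 0 then
    if ((i : Int) - j).toNat < i then
      pvMinOpt a (pvE hs k ((i : Int) - j).toNat + |hs.getD i 0 - hs.getD ((i : Int) - j).toNat 0|)
    else a
  else a

lemma foldl_minOpt_some (cs : List Int) : ∀ c : Int, cs.foldl pvMinOpt (some c) = some (cs.foldl min c) := by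
  induction cs with
  | nil => intro c; rfl
  | cons e cs ih => intro c; simpa [pvMinOpt] using ih (min c e)

lemma pvGood_set (hs : List Int) (k : Int) (dp : List Int) (m : Nat)
    (hm : m < hs.length) (h : pvGood hs k dp) : pvGood hs k (dp.set m (pvE hs k m)) := by
  obtain ⟨hlen, hinv⟩ := h
  refine ⟨by simp [hlen], ?_⟩
  intro t ht
  by_cases htm : t = m
  · subst htm
    right
    simp [List.getD_eq_getElem?_getD, hlen, ht]
  · have hmt : m ≠ t := Ne.symm htm
    have := hinv t ht
    simpa [List.getD_eq_getElem?_getD, List.getElem?_set, htm, hmt] using this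

lemma pvLoopA_spec (hs : List Int) (k : Int) (i : Nat)
    (HS : ∀ i' dp', i' < i → pvGood hs k dp' →
      (pvSolveA hs k i' dp').1 = pvE hs k i' ∧ pvGood hs k (pvSolveA hs k i' dp').2) :
    ∀ (js : List Int) (acc : Option Int) (dp : List Int), pvGood hs k dp →
      (pvLoopA hs k i js acc dp).1 = js.foldl (pvStepF hs k i) acc ∧
      pvGood hs k (pvLoopA hs k i js acc dp).2 := by
  intro js
  induction js with
  | nil => intro acc dp hg; rw [pvLoopA]; exact ⟨rfl, hg⟩
  | cons j js ih =>
    intro acc dp hg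
    rw [pvLoopA]
    by_cases hge : (i : Int) - j ≥ 0
    · by_cases hlt : ((i : Int) - j).toNat < i
      · obtain ⟨hv, hg'⟩ := HS (((i : Int) - j).toNat) dp hlt hg
        simp only [hge, if_pos, hlt, dif_pos, pvStepF, List.foldl_cons]
        rw [hv]
        exact ih _ _ hg'
      · simp only [hge, if_pos, hlt, dif_neg, not_false_iff, pvStepF, List.foldl_cons, if_neg]
        exact ih _ _ hg
    · simp only [hge, if_neg, not_false_iff, pvStepF, List.foldl_cons]
      exact ih _ _ hg

lemma pvFold_pyRange (hs : List Int) (k : Int) (i : Nat) : ∀ (K : Nat) (acc : Option Int),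
    (PySem.List.pyRange 1 ((K : Int) + 1) 1).foldl (pvStepF hs k i) acc
      = ((List.range' 1 (min K i)).map
          (fun j => pvE hs k (i-j) + |hs.getD i 0 - hs.getD (i-j) 0|)).foldl pvMinOpt acc := by
  intro K
  induction K with
  | zero =>
    intro acc
    rw [PySem.List.pyRange_one_eq_nil (by norm_num)]
    simp
  | succ K ih =>
    intro acc
    have hsplit : PySem.List.pyRange 1 ((K+1 : Nat) + 1) 1
        = PySem.List.pyRange 1 ((K : Int) + 1) 1 ++ [(K : Int) + 1] := by
      have := PySem.List.pyRange_one_succ_right (a := 1) (b := (K : Int) + 1) (by omega)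
      push_cast
      push_cast at this
      convert this using 2
    rw [hsplit, List.foldl_append, ih]
    by_cases hK : K + 1 ≤ i
    · have hmin : min (K+1) i = min K i + 1 := by omega
      have hmin' : min K i = K := by omega
      rw [hmin, List.range'_1_concat, List.map_append, List.foldl_append]
      simp only [List.map_cons, List.map_nil, List.foldl_cons, List.foldl_nil]
      have hg1 : ((i : Int) - ((K : Int) + 1)) ≥ 0 := by omega
      have htn : ((i : Int) - ((K : Int) + 1)).toNat = i - (K + 1) := by omega
      have hg2 : ((i : Int) - ((K : Int) + 1)).toNat < i := by omega
      simp only [List.foldl_cons, List.foldl_nil, pvStepF]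
      rw [if_pos hg1, if_pos hg2, htn, hmin']
      rw [show 1 + K = K + 1 from by omega]
    · have hmin : min (K+1) i = min K i := by omega
      have hg1 : ¬ ((i : Int) - ((K : Int) + 1) ≥ 0) := by omega
      simp only [List.foldl_cons, List.foldl_nil, pvStepF]
      rw [if_neg hg1, hmin]

lemma pvSolveA_spec (hs : List Int) (k : Int) (hk : 1 ≤ k) :
    ∀ i, i < hs.length → ∀ dp, pvGood hs k dp →
      (pvSolveA hs k i dp).1 = pvE hs k i ∧ pvGood hs k (pvSolveA hs k i dp).2 := by
  intro i
  induction i using Nat.strong_induction_on with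
  | _ i IH =>
    match i with
    | 0 =>
      intro _ dp hg
      rw [pvSolveA]
      exact ⟨by rw [pvE], hg⟩
    | Nat.succ i =>
      intro hi dp hg
      rw [pvSolveA]
      by_cases hcur : dp.getD (i+1) (-1) ≠ -1
      · rw [if_pos hcur]
        rcases hg.2 (i+1) hi with h | h
        · exact absurd h hcur
        · exact ⟨h, hg⟩
      · rw [if_neg hcur]
        have HS : ∀ i' dp', i' < i + 1 → pvGood hs k dp' →
            (pvSolveA hs k i' dp').1 = pvE hs k i' ∧ pvGood hs k (pvSolveA hs k i' dp').2 := by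
          intro i' dp' hi' hg'
          exact IH i' hi' (by omega) dp' hg'
        obtain ⟨hval, hg'⟩ := pvLoopA_spec hs k (i+1) HS (PySem.List.pyRange 1 (k+1) 1) none dp hg
        have hkk : ((k.toNat : Int)) = k := Int.toNat_of_nonneg (by omega)
        have hfold : (PySem.List.pyRange 1 (k+1) 1).foldl (pvStepF hs k (i+1)) none
            = (pvCands hs k (i+1)).foldl pvMinOpt none := by
          have h := pvFold_pyRange hs k (i+1) k.toNat none
          rw [hkk] at h
          rw [h, pvCands]
        have hne : min k.toNat (i+1) ≥ 1 := by omega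
        have hlen : (pvCands hs k (i+1)).length = min k.toNat (i+1) := by
          simp [pvCands]
        obtain ⟨c, cs, hcc⟩ : ∃ c cs, pvCands hs k (i+1) = c :: cs := by
          cases h : pvCands hs k (i+1) with
          | nil => rw [h] at hlen; simp at hlen; omega
          | cons c cs => exact ⟨c, cs, rfl⟩
        have hvE : pvE hs k (i+1) = cs.foldl min c := by rw [pvE_succ, hcc]
        have h1 : (pvLoopA hs k (i+1) (PySem.List.pyRange 1 (k+1) 1) none dp).1 = some (pvE hs k (i+1)) := by
          rw [hval, hfold, hcc]
          simp only [List.foldl_cons, pvMinOpt]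
          rw [foldl_minOpt_some, hvE]
        refine ⟨?_, ?_⟩
        · show (pvLoopA hs k (i+1) (PySem.List.pyRange 1 (k+1) 1) none dp).1.getD 0 = pvE hs k (i+1)
          rw [h1]
          rfl
        · show pvGood hs k ((pvLoopA hs k (i+1) (PySem.List.pyRange 1 (k+1) 1) none dp).2.set (i+1)
            ((pvLoopA hs k (i+1) (PySem.List.pyRange 1 (k+1) 1) none dp).1.getD 0))
          rw [h1]
          exact pvGood_set hs k _ (i+1) hi hg'

lemma pvGood_replicate (hs : List Int) (k : Int) : pvGood hs k (List.replicate hs.length (-1)) := by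
  refine ⟨by simp, ?_⟩
  intro m hm
  left
  simp [List.getD_eq_getElem?_getD, List.getElem?_replicate, hm]

lemma pvA_eq_E (hs : List Int) (k : Int) (hk : 1 ≤ k) (hne : hs ≠ []) :
    frogJumpK_td hs k = pvE hs k (hs.length - 1) := by
  rw [frogJumpK_td]
  cases hl : hs.length with
  | zero => exact absurd (List.length_eq_zero_iff.mp hl) hne
  | succ m =>
    have : m < hs.length := by omega
    have hrep : pvGood hs k (List.replicate (m+1) (-1)) := by
      have := pvGood_replicate hs k
      rwa [hl] at this
    have := (pvSolveA_spec hs k hk m this (List.replicate (m+1) (-1)) hrep).1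
    simp only [this, hl]
    norm_num

-- ===== B side =====

lemma pvAlt_inv (hs : List Int) (k : Int) (hk : 1 ≤ k) :
    ∀ M, M < hs.length →
      ((PySem.List.pyRange 1 ((M : Int) + 1) 1).foldl (pvStepB hs k) (List.replicate hs.length 0)).length = hs.length ∧
      ∀ t, t ≤ M →
        ((PySem.List.pyRange 1 ((M : Int) + 1) 1).foldl (pvStepB hs k) (List.replicate hs.length 0)).getD t 0
          = pvE hs k t := by
  intro M
  induction M with
  | zero =>
    intro h0
    rw [PySem.List.pyRange_one_eq_nil (by norm_num)]
    refine ⟨by simp, ?_⟩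
    intro t ht
    interval_cases t
    simp [pvE, List.getD_eq_getElem?_getD, h0]
  | succ M ih =>
    intro hM
    obtain ⟨ihlen, ihval⟩ := ih (by omega)
    have hsplit : PySem.List.pyRange 1 ((M+1 : Nat) + 1) 1
        = PySem.List.pyRange 1 ((M : Int) + 1) 1 ++ [(M : Int) + 1] := by
      have := PySem.List.pyRange_one_succ_right (a := 1) (b := (M : Int) + 1) (by omega)
      push_cast
      push_cast at this
      convert this using 2
    set dpM := (PySem.List.pyRange 1 ((M : Int) + 1) 1).foldl (pvStepB hs k) (List.replicate hs.length 0) with hdpM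
    rw [hsplit, List.foldl_append]
    simp only [List.foldl_cons, List.foldl_nil, ← hdpM]
    -- one step of B computes pvE (M+1)
    have hmt : ((M : Int) + 1).toNat = M + 1 := by omega
    have hcands : (PySem.List.pyRange 1 (min k ((M : Int)+1) + 1) 1).map (fun j =>
          dpM.getD (((M : Int)+1) - j).toNat 0 + |hs.getD ((M : Int)+1).toNat 0 - hs.getD (((M : Int)+1) - j).toNat 0|)
        = pvCands hs k (M+1) := by
      have hmin0 : (0:Int) ≤ min k ((M : Int)+1) := by omega
      have hminc : ((min k ((M : Int)+1)).toNat : Int) = min k ((M : Int)+1) := Int.toNat_of_nonneg hmin0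
      have hminn : (min k ((M : Int)+1)).toNat = min k.toNat (M+1) := by omega
      rw [pvCands, ← hminc, hminn]
      rw [PySem.List.pyRange_one, List.range'_eq_map_range]
      rw [List.map_map, List.map_map]
      rw [show (((min k.toNat (M+1) : Nat) : Int) + 1 - 1).toNat = min k.toNat (M+1) from by omega]
      apply List.map_congr_left
      intro t ht
      have ht' : t < min k.toNat (M+1) := List.mem_range.mp ht
      have hj1 : (1:Int) ≤ 1 + (t:Int) := by omega
      have htn : (((M : Int) + 1) - (1 + (t:Int))).toNat = M + 1 - (1 + t) := by omega
      simp only [Function.comp_apply]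
      rw [hmt, htn]
      have hle : M + 1 - (1+t) ≤ M := by omega
      rw [ihval (M + 1 - (1+t)) hle]
    rw [pvStepB]
    simp only [hmt] at hcands ⊢
    rw [hcands]
    refine ⟨by simp [ihlen], ?_⟩
    intro t ht
    have hbest : (match pvCands hs k (M+1) with
        | [] => (0:Int)
        | c :: cs => cs.foldl min c) = pvE hs k (M+1) := (pvE_succ hs k M).symm
    by_cases htM : t = M + 1
    · subst htM
      rw [hbest]
      simp [List.getD_eq_getElem?_getD, ihlen, hM]
    · have ht' : t ≤ M := by omega
      rw [hbest]
      have := ihval t ht'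
      have hMt : M + 1 ≠ t := Ne.symm htM
      simpa [List.getD_eq_getElem?_getD, List.getElem?_set, hMt, htM] using
        (by simpa [List.getD_eq_getElem?_getD] using this : dpM[t]?.getD 0 = pvE hs k t)

lemma pvB_eq_E (hs : List Int) (k : Int) (hk : 1 ≤ k) (hne : hs ≠ []) :
    frogJumpK_td_alt hs k = pvE hs k (hs.length - 1) := by
  rw [frogJumpK_td_alt]
  have hl : 1 ≤ hs.length := List.length_pos_iff.mpr hne
  have hcast : ((hs.length : Int)) = ((hs.length - 1 : Nat) : Int) + 1 := by omega
  obtain ⟨hlen, hval⟩ := pvAlt_inv hs k hk (hs.length - 1) (by omega)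
  simp only [hcast]
  exact hval (hs.length - 1) le_rfl

-- ===== VERDICT (by name: the statement is the Claim_ definition above) =====
theorem frogJumpK_td_spec : Claim_equal_frogJumpK_td := by
  intro hs k _ hpre
  obtain ⟨hne, hk1⟩ := hpre
  unfold Spec_frogJumpK_td
  rcases hk1 with hk | h1
  · rw [pvA_eq_E hs k hk hne, pvB_eq_E hs k hk hne]
  · obtain ⟨a, ha⟩ : ∃ a, hs = [a] := List.length_eq_one_iff.mp h1
    subst ha
    rw [frogJumpK_td, frogJumpK_td_alt]
    simp [pvSolveA, PySem.List.pyRange_one_eq_nil]
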